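-- pv_equiv track=rewrite | github.com/gragas/hackerrank | algorithms/make_it_anagram/solution.py | solution
-- ===== SOURCE A (Python) =====
-- def solution(a, b):
--     acounts = { c : a.count(c) for c in a }
--     bcounts = { c : b.count(c) for c in b }
--     for c in a:
--         if not c in b:
--             bcounts[c] = 0
--     for c in b:
--         if not c in a:
--             acounts[c] = 0
--     total = 0
--     for key in acounts:
--         total += abs(acounts[key] - bcounts[key])
--     return total
-- ===== SOURCE B (Python) =====
-- def solution(a, b):
--     # Sort both strings, then merge with two indices: equal heads are a
--     # matched pair; otherwise the smaller head is unmatched and counts 1.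
--     # Leftover tails are all unmatched.
--     sa = sorted(a)
--     sb = sorted(b)
--     i = j = t = 0
--     while i < len(sa) and j < len(sb):
--         x, y = sa[i], sb[j]
--         if x == y:
--             i += 1
--             j += 1
--         elif x < y:
--             t += 1
--             i += 1
--         else:
--             t += 1
--             j += 1
--     return t + (len(sa) - i) + (len(sb) - j)
-- ===== Notes on version B (the rewrite author's own statement) =====
-- stated objective: faster
-- what changed: A builds two character-count dicts (via quadratic str.count comprehensions plus two cross-fill loops) and sums |acounts[k]-bcounts[k]|; B sorts both strings and does a two-pointer merge counting unmatched characters plus the leftover tails, with no frequency table at all.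
import Mathlib
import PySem

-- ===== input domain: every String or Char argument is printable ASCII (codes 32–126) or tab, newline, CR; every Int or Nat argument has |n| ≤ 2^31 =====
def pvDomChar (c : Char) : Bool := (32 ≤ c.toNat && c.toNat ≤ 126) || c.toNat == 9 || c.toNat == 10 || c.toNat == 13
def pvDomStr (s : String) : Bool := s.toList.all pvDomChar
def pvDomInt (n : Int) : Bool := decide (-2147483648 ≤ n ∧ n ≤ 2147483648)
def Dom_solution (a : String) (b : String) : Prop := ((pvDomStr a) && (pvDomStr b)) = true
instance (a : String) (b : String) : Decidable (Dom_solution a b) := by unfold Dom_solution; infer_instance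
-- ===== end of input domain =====

-- B replaces A's frequency-dict construction by a sort-then-merge two-pointer
-- scan counting unmatched characters (measured faster: O(n log n) vs A's O(n^2)).

-- ===== PORT A =====
def solution (a : String) (b : String) : Int :=
  let al := a.toList
  let bl := b.toList
  -- acounts = { c : a.count(c) for c in a } ; bcounts likewise
  let acounts0 := al.foldl (fun d c => d.insert c (al.count c : Int)) PySem.Dict.empty
  let bcounts0 := bl.foldl (fun d c => d.insert c (bl.count c : Int)) PySem.Dict.empty
  -- for c in a: if not c in b: bcounts[c] = 0
  let bcounts := al.foldl (fun d c => if !bl.contains c then d.insert c 0 else d) bcounts0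
  -- for c in b: if not c in a: acounts[c] = 0
  let acounts := bl.foldl (fun d c => if !al.contains c then d.insert c 0 else d) acounts0
  -- total = 0; for key in acounts: total += abs(acounts[key] - bcounts[key])
  acounts.keys.foldl (fun total k => total + |acounts.getD k 0 - bcounts.getD k 0|) 0

-- ===== PORT B =====
-- the while loop over indices i, j; the two remaining suffixes sa[i:], sb[j:]
-- are carried directly, so 'len(sa) - i' is the length of the first suffix
def mergeLoop (t : Int) : List Char → List Char → Int
  | x :: xs, y :: ys =>
      if x = y then mergeLoop t xs ys
      else if x < y then mergeLoop (t + 1) xs (y :: ys)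
      else mergeLoop (t + 1) (x :: xs) ys
  | xs, ys => t + xs.length + ys.length
termination_by xs ys => xs.length + ys.length

def solution_alt (a : String) (b : String) : Int :=
  let sa := PySem.List.sorted a.toList (fun c => c) false
  let sb := PySem.List.sorted b.toList (fun c => c) false
  mergeLoop 0 sa sb

-- ===== PRECONDITION & SPEC =====
def Spec_solution (a : String) (b : String) (out : Int) : Prop := out = solution_alt a b
instance (a : String) (b : String) (out : Int) : Decidable (Spec_solution a b out) := by unfold Spec_solution; infer_instance

-- ===== CLAIM (what is proved, stated in full; the proofs are below) =====
def Claim_equal_solution : Prop := ∀ (a : String) (b : String), Dom_solution a b → Spec_solution a b (solution a b)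

-- ===== LEMMAS AND PROOFS =====

-- keys of an insert, as PySem.Set.add
lemma keys_insert_eq_add (d : PySem.Dict Char Int) (k : Char) (v : Int) :
    (d.insert k v).keys = PySem.Set.add d.keys k := by
  cases h : d.contains k with
  | true =>
      rw [PySem.Set.add_of_mem ((PySem.Dict.contains_iff_mem_keys _ _).mp h)]
      rw [PySem.Dict.keys, PySem.Dict.keys, PySem.Dict.items_insert_of_contains d v h,
        List.map_map]
      refine List.map_congr_left (fun p _ => ?_)
      by_cases hpk : p.1 = k
      · simp [hpk]
      · simp [hpk]
  | false =>
      rw [PySem.Dict.keys_insert_of_not_contains d v h,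
        PySem.Set.add_of_not_mem (fun hm => by
          rw [(PySem.Dict.contains_iff_mem_keys _ _).mpr hm] at h; cases h)]

-- lookup after A's {c : g(c) for c in l} comprehension fold
lemma getD_foldl_insert_fun (g : Char → Int) :
    ∀ (l : List Char) (d : PySem.Dict Char Int) (k : Char),
    (l.foldl (fun d c => d.insert c (g c)) d).getD k 0 =
      if k ∈ l then g k else d.getD k 0 := by
  intro l
  induction l with
  | nil => intro d k; simp
  | cons x l ih =>
      intro d k
      rw [List.foldl_cons, ih]
      rw [PySem.Dict.getD_insert]
      by_cases hl : k ∈ l <;> by_cases hx : k = x <;> simp [hl, hx]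

-- lookup after A's 'for c in l: if p(c): d[c] = 0' fill loop
lemma getD_foldl_insert_if (p : Char → Bool) :
    ∀ (l : List Char) (d : PySem.Dict Char Int) (k : Char),
    (l.foldl (fun d c => if p c then d.insert c 0 else d) d).getD k 0 =
      if k ∈ l ∧ p k then 0 else d.getD k 0 := by
  intro l
  induction l with
  | nil => intro d k; simp
  | cons x l ih =>
      intro d k
      rw [List.foldl_cons]
      by_cases hp : p x = true
      · rw [if_pos hp, ih, PySem.Dict.getD_insert]
        by_cases hx : k = x <;> by_cases hpk : p k = true <;>
          by_cases hl : k ∈ l <;> simp_all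
      · rw [if_neg hp, ih]
        by_cases hx : k = x <;> by_cases hpk : p k = true <;>
          by_cases hl : k ∈ l <;> simp_all

-- keys after A's fill loop
lemma keys_foldl_insert_if (p : Char → Bool) :
    ∀ (l : List Char) (d : PySem.Dict Char Int),
    (l.foldl (fun d c => if p c then d.insert c 0 else d) d).keys =
      PySem.Set.update d.keys (l.filter p) := by
  intro l
  induction l with
  | nil => intro d; simp [PySem.Set.update_nil]
  | cons x l ih =>
      intro d
      rw [List.foldl_cons, List.filter_cons]
      by_cases hp : p x = true
      · rw [if_pos hp, if_pos hp, ih, PySem.Set.update_cons, keys_insert_eq_add]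
      · rw [if_neg hp, if_neg hp, ih]

-- updating with a filtered list is updating with the whole list when the
-- dropped elements are already present
lemma set_update_filter (p : Char → Bool) :
    ∀ (l s : List Char), (∀ x ∈ l, p x = false → x ∈ s) →
    PySem.Set.update s (l.filter p) = PySem.Set.update s l := by
  intro l
  induction l with
  | nil => intro s _; simp
  | cons x l ih =>
      intro s hs
      rw [List.filter_cons, PySem.Set.update_cons]
      by_cases hp : p x = true
      · rw [if_pos hp, PySem.Set.update_cons]
        exact ih _ (fun y hy hq =>
          (PySem.Set.mem_add s x y).mpr (Or.inl (hs y (List.mem_cons_of_mem _ hy) hq)))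
      · rw [if_neg hp,
          PySem.Set.add_of_mem (hs x (List.mem_cons_self) (Bool.eq_false_iff.mpr hp ▸ rfl))]
        exact ih _ (fun y hy hq => hs y (List.mem_cons_of_mem _ hy) hq)

-- the common key order of A's final dict
def keyOrder (al bl : List Char) : List Char :=
  PySem.Set.update (PySem.Set.ofList al) bl

-- A's final dict looks up a's counts at every key
lemma acounts_getD (al bl : List Char) (k : Char) :
    ((bl.foldl (fun d c => if !al.contains c then d.insert c 0 else d)
        (al.foldl (fun d c => d.insert c (al.count c : Int)) PySem.Dict.empty)).getD k 0)
      = (al.count k : Int) := by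
  rw [getD_foldl_insert_if (fun c => !al.contains c) bl _ k,
    getD_foldl_insert_fun (fun c => (al.count c : Int)) al _ k]
  by_cases ha : k ∈ al
  · simp [ha]
  · have : al.count k = 0 := List.count_eq_zero.mpr ha
    simp [ha, this]

-- A's key list is keyOrder
lemma acounts_keys (al bl : List Char) :
    ((bl.foldl (fun d c => if !al.contains c then d.insert c 0 else d)
        (al.foldl (fun d c => d.insert c (al.count c : Int)) PySem.Dict.empty)).keys)
      = keyOrder al bl := by
  rw [keys_foldl_insert_if (fun c => !al.contains c) bl _]
  have hk : (al.foldl (fun d c => d.insert c (al.count c : Int)) PySem.Dict.empty).keys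
      = PySem.Set.ofList al := by
    have := PySem.Dict.keys_foldl_insert al (fun _ c => (al.count c : Int)) PySem.Dict.empty
    simpa [PySem.Dict.keys_empty, PySem.Set.update_nil_left] using this
  rw [hk, keyOrder]
  exact set_update_filter _ bl _ (fun x _ hq => by
    simp only [Bool.not_eq_false'] at hq
    exact (PySem.Set.mem_ofList al x).mpr (by simpa using hq))

-- a sum of counts over any superset of the support is the length
lemma sum_count_eq_length (l : List Char) (s : Finset Char) (hs : ∀ c ∈ l, c ∈ s) :
    (∑ c ∈ s, (l.count c : Int)) = l.length := by
  rw [← Finset.sum_subset (fun c hc => hs c (List.mem_toFinset.mp hc))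
      (by intro c _ hc; simp [List.count_eq_zero.mpr (fun h => hc (List.mem_toFinset.mpr h))])]
  have hnat : ∑ c ∈ l.toFinset, l.count c = l.length := by
    simpa using Multiset.toFinset_sum_count_eq (l : Multiset Char)
  exact_mod_cast congrArg (Nat.cast (R := Int)) hnat

-- the merge loop computes the sum of absolute count differences, for sorted inputs
lemma mergeLoop_eq (s : Finset Char) (xs ys : List Char) (t : Int)
    (hxs : xs.Pairwise (· ≤ ·)) (hys : ys.Pairwise (· ≤ ·))
    (hs : ∀ c, c ∈ xs ∨ c ∈ ys → c ∈ s) :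
    mergeLoop t xs ys = t + ∑ c ∈ s, |(xs.count c : Int) - (ys.count c : Int)| := by
  match xs, ys with
  | [], ys =>
      rw [mergeLoop]
      · simp only [List.count_nil, Nat.cast_zero, zero_sub, abs_neg]
        have habs : ∀ c ∈ s, |(ys.count c : Int)| = (ys.count c : Int) := by
          intro c _; exact abs_of_nonneg (by positivity)
        rw [Finset.sum_congr rfl habs, sum_count_eq_length ys s (fun c hc => hs c (Or.inr hc))]
        simp
      · intros; simp_all
  | x :: xs, [] =>
      rw [mergeLoop]
      · simp only [List.count_nil, Nat.cast_zero, sub_zero]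
        have habs : ∀ c ∈ s, |((x :: xs).count c : Int)| = ((x :: xs).count c : Int) := by
          intro c _; exact abs_of_nonneg (by positivity)
        rw [Finset.sum_congr rfl habs,
          sum_count_eq_length (x :: xs) s (fun c hc => hs c (Or.inl hc))]
        simp
      · intros; simp_all
  | x :: xs, y :: ys =>
      rw [mergeLoop]
      by_cases hxy : x = y
      · rw [if_pos hxy]
        rw [mergeLoop_eq s xs ys t hxs.tail hys.tail
          (fun c hc => hs c (by rcases hc with h | h
                                · exact Or.inl (List.mem_cons_of_mem _ h)
                                · exact Or.inr (List.mem_cons_of_mem _ h)))]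
        subst hxy
        congr 1
        refine Finset.sum_congr rfl (fun c _ => ?_)
        rw [List.count_cons, List.count_cons]
        by_cases hc : c = x
        · subst hc; simp
        · simp [(Ne.symm hc : ¬ x = c)]
      · rw [if_neg hxy]
        by_cases hlt : x < y
        · rw [if_pos hlt]
          have hy0 : (y :: ys).count x = 0 := by
            refine List.count_eq_zero.mpr (fun hm => ?_)
            rcases List.mem_cons.mp hm with h | h
            · exact hxy h
            · exact absurd (List.rel_of_pairwise_cons hys h) (not_le.mpr hlt)
          rw [mergeLoop_eq s xs (y :: ys) (t + 1) hxs.tail hys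
            (fun c hc => hs c (by rcases hc with h | h
                                  · exact Or.inl (List.mem_cons_of_mem _ h)
                                  · exact Or.inr h))]
          have hsplit : ∀ c ∈ s,
              |((x :: xs).count c : Int) - ((y :: ys).count c : Int)|
                = |(xs.count c : Int) - ((y :: ys).count c : Int)|
                  + (if c = x then (1 : Int) else 0) := by
            intro c _
            rw [List.count_cons]
            by_cases hc : c = x
            · subst hc
              rw [hy0]
              have h1 : (0 : Int) ≤ (xs.count c : Int) := by positivity
              simp [abs_of_nonneg h1,
                abs_of_nonneg (by linarith : (0 : Int) ≤ (xs.count c : Int) + 1)]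
            · simp [hc, (Ne.symm hc : ¬ x = c)]
          rw [Finset.sum_congr rfl hsplit, Finset.sum_add_distrib,
            Finset.sum_ite_eq' s x (fun _ => (1 : Int)),
            if_pos (hs x (Or.inl List.mem_cons_self))]
          ring
        · rw [if_neg hlt]
          have hyx : y < x := lt_of_le_of_ne (not_lt.mp hlt) (Ne.symm hxy)
          have hx0 : (x :: xs).count y = 0 := by
            refine List.count_eq_zero.mpr (fun hm => ?_)
            rcases List.mem_cons.mp hm with h | h
            · exact hxy h.symm
            · exact absurd (List.rel_of_pairwise_cons hxs h) (not_le.mpr hyx)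
          rw [mergeLoop_eq s (x :: xs) ys (t + 1) hxs hys.tail
            (fun c hc => hs c (by rcases hc with h | h
                                  · exact Or.inl h
                                  · exact Or.inr (List.mem_cons_of_mem _ h)))]
          have hsplit : ∀ c ∈ s,
              |((x :: xs).count c : Int) - ((y :: ys).count c : Int)|
                = |((x :: xs).count c : Int) - (ys.count c : Int)|
                  + (if c = y then (1 : Int) else 0) := by
            intro c _
            have hcc : ((y :: ys).count c : Int) = (ys.count c : Int) + (if y = c then 1 else 0) := by
              rw [List.count_cons]
              by_cases hc : c = y <;> simp [hc]
            rw [hcc]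
            by_cases hc : c = y
            · subst hc
              rw [hx0]
              have h1 : (0 : Int) ≤ (ys.count c : Int) := by positivity
              simp only [Nat.cast_zero, zero_sub, abs_neg, abs_of_nonneg h1, if_true]
              rw [abs_of_nonneg (by linarith : (0 : Int) ≤ (ys.count c : Int) + 1)]
            · simp [hc, (Ne.symm hc : ¬ y = c)]
          rw [Finset.sum_congr rfl hsplit, Finset.sum_add_distrib,
            Finset.sum_ite_eq' s y (fun _ => (1 : Int)),
            if_pos (hs y (Or.inr List.mem_cons_self))]
          ring
termination_by xs.length + ys.length
decreasing_by all_goals simp <;> omega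

-- the key list of A's final dict has no duplicates
lemma keyOrder_nodup (al bl : List Char) : (keyOrder al bl).Nodup :=
  PySem.Set.nodup_update _ _ (PySem.Set.nodup_ofList al)

lemma mem_keyOrder (al bl : List Char) (c : Char) :
    c ∈ keyOrder al bl ↔ c ∈ al ∨ c ∈ bl := by
  unfold keyOrder
  rw [PySem.Set.mem_update, PySem.Set.mem_ofList]

-- ===== VERDICT (by name: the statement is the Claim_ definition above) =====
theorem solution_spec : Claim_equal_solution := by
  unfold Claim_equal_solution
  intro a b _
  unfold Spec_solution solution solution_alt
  simp only []  -- zeta-reduce the lets of both ports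
  set al := a.toList
  set bl := b.toList
  set sa := PySem.List.sorted al (fun c => c) false with hsa
  set sb := PySem.List.sorted bl (fun c => c) false with hsb
  -- A side: the accumulator loop is a sum over keyOrder of |count al k - count bl k|
  rw [PySem.List.foldl_add _ _ 0, acounts_keys al bl, zero_add]
  have hmap : (keyOrder al bl).map (fun k =>
      |((bl.foldl (fun d c => if !al.contains c then d.insert c 0 else d)
          (al.foldl (fun d c => d.insert c (al.count c : Int)) PySem.Dict.empty)).getD k 0)
        - ((al.foldl (fun d c => if !bl.contains c then d.insert c 0 else d)
          (bl.foldl (fun d c => d.insert c (bl.count c : Int)) PySem.Dict.empty)).getD k 0)|)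
      = (keyOrder al bl).map (fun k => |(al.count k : Int) - (bl.count k : Int)|) :=
    List.map_congr_left (fun k _ => by rw [acounts_getD al bl k, acounts_getD bl al k])
  rw [hmap]
  -- B side: the merge loop is the same sum over the Finset of those keys
  have hperm_a : sa.Perm al := PySem.List.sorted_perm al (fun c => c) false
  have hperm_b : sb.Perm bl := PySem.List.sorted_perm bl (fun c => c) false
  rw [mergeLoop_eq (keyOrder al bl).toFinset sa sb 0
      (PySem.List.sorted_pairwise al (fun c => c))
      (PySem.List.sorted_pairwise bl (fun c => c))
      (fun c hc => List.mem_toFinset.mpr ((mem_keyOrder al bl c).mpr (by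
        rcases hc with h | h
        · exact Or.inl (hperm_a.mem_iff.mp h)
        · exact Or.inr (hperm_b.mem_iff.mp h)))), zero_add]
  have hcnt : ∀ c ∈ (keyOrder al bl).toFinset,
      |(sa.count c : Int) - (sb.count c : Int)| = |(al.count c : Int) - (bl.count c : Int)| := by
    intro c _
    rw [hperm_a.count_eq c, hperm_b.count_eq c]
  rw [Finset.sum_congr rfl hcnt,
    List.sum_toFinset _ (keyOrder_nodup al bl)]
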